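-- pv_equiv track=rewrite | github.com/rigaux/neuma | lib/search/Sequence.py | rhythms_to_ngrams
-- ===== SOURCE A (Python) =====
-- NGRAM_SIZE = 3
--
-- def rhythms_to_ngrams(dict):
--     #
--     #   Splits rhythms ratios into ngrams with size NGRAM_SIZE, e.g : (3/4)(2/3)(1/2) (2/3)(1/2)(1/2) ...
--     #
--     nb_codes = len(dict)
--     text = ""
--     for i in range(nb_codes - NGRAM_SIZE + 1):
--         ngram = ""
--         for j in range(i, i + NGRAM_SIZE):
--             # Surround ratios with parentheses
--             ngram += "(" + str(dict[j]["value"]) + ")"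
--         text += ngram + " "
--     return text
-- ===== SOURCE B (Python) =====
-- NGRAM_SIZE = 3
--
-- def rhythms_to_ngrams(dict):
--     # Streaming pass: keep a rolling window of the last NGRAM_SIZE tokens;
--     # whenever the window fills, emit it as one ngram and slide it by one.
--     if len(dict) < NGRAM_SIZE:
--         return ""
--     text = ""
--     window = []
--     for d in dict:
--         window = window + ["(" + str(d["value"]) + ")"]
--         if len(window) == NGRAM_SIZE:
--             text += "".join(window) + " "
--             window = window[1:]
--     return text
-- ===== Notes on version B (the rewrite author's own statement) =====
-- stated objective: alternative
-- what changed: B replaces A's indexed nested loops over windows by a single streaming pass that maintains a rolling buffer of the last NGRAM_SIZE tokens, emitting an ngram each time the buffer fills and sliding it by one.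
import Mathlib
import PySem

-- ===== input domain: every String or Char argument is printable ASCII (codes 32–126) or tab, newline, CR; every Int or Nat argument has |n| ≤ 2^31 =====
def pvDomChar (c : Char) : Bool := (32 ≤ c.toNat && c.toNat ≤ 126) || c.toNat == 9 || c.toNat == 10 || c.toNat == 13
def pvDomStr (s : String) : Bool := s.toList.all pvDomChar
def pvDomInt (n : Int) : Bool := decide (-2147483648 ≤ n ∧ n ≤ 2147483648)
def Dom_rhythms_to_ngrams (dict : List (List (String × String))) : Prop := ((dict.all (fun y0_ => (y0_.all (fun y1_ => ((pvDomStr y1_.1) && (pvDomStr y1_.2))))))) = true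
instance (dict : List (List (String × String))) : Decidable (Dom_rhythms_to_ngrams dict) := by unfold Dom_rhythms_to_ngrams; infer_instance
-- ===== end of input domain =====

-- B makes a single streaming pass with a rolling window of the last 3 tokens,
-- replacing A's indexed nested loop that re-wraps each entry per window (objective: alternative).

-- ===== PORT A =====
def rhythms_to_ngrams (dict : List (List (String × String))) : String :=
  let nb_codes : Int := PySem.List.len dict
  (PySem.List.pyRange 0 (nb_codes - 3 + 1) 1).foldl (fun text i =>
    let ngram : String := (PySem.List.pyRange i (i + 3) 1).foldl (fun ngram j =>
      ngram ++ ("(" ++ PySem.Dict.getD (PySem.Dict.mk (PySem.List.pyGetD dict j [])) "value" "" ++ ")")) ""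
    text ++ (ngram ++ " ")) ""

-- ===== PORT B =====
def rhythms_to_ngrams_alt (dict : List (List (String × String))) : String :=
  if PySem.List.len dict < 3 then ""
  else
    let st := dict.foldl (fun (st : String × List String) d =>
      let window := st.2 ++ ["(" ++ PySem.Dict.getD (PySem.Dict.mk d) "value" "" ++ ")"]
      if window.length == 3 then
        (st.1 ++ (PySem.Str.join "" window ++ " "), PySem.List.slice window (some 1) none)
      else (st.1, window)) ("", [])
    st.1

-- ===== PRECONDITION & SPEC =====
-- Pre_ excludes exactly the inputs where A raises KeyError: length ≥ 3 with some row lacking key "value"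
-- (B raises KeyError on the very same inputs).
def Pre_rhythms_to_ngrams (dict : List (List (String × String))) : Prop :=
  dict.length < 3 ∨ ∀ row ∈ dict, (PySem.Dict.mk row).contains "value" = true
instance (dict : List (List (String × String))) : Decidable (Pre_rhythms_to_ngrams dict) := by unfold Pre_rhythms_to_ngrams; infer_instance

def pvWitness_rhythms_to_ngrams : (List (List (String × String))) :=
  [[("value", "3/4")], [("value", "2/3")], [("value", "1/2")], [("value", "1")]]

def Spec_rhythms_to_ngrams (dict : List (List (String × String))) (out : String) : Prop := out = rhythms_to_ngrams_alt dict
instance (dict : List (List (String × String))) (out : String) : Decidable (Spec_rhythms_to_ngrams dict out) := by unfold Spec_rhythms_to_ngrams; infer_instance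

-- ===== CLAIM (what is proved, stated in full; the proofs are below) =====
def Claim_equal_rhythms_to_ngrams : Prop := ∀ (dict : List (List (String × String))), Dom_rhythms_to_ngrams dict → Pre_rhythms_to_ngrams dict → Spec_rhythms_to_ngrams dict (rhythms_to_ngrams dict)

-- ===== LEMMAS AND PROOFS =====

-- The token of one row.
def pvTok (d : List (String × String)) : String :=
  "(" ++ PySem.Dict.getD (PySem.Dict.mk d) "value" "" ++ ")"

-- Reference recursion: the ngram text of a token list, window by window.
def pvNgrams : List String → String
  | a :: b :: c :: rest => (PySem.Str.join "" [a, b, c] ++ " ") ++ pvNgrams (b :: c :: rest)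
  | _ => ""

-- ''.join with empty separator peels one element off the front.
lemma str_join_empty_cons (x : String) (ys : List String) :
    PySem.Str.join "" (x :: ys) = x ++ PySem.Str.join "" ys := by
  cases ys with
  | nil => simp [PySem.Str.join, PySem.Chars.join_singleton, PySem.Chars.join_nil]
  | cons y ys => simp [PySem.Str.join, PySem.Chars.join_cons_cons]

-- An appending string fold is the join of the mapped list.
lemma foldl_append_eq_join (g : Int → String) (l : List Int) (init : String) :
    l.foldl (fun t i => t ++ g i) init = init ++ PySem.Str.join "" (l.map g) := by
  induction l generalizing init with
  | nil => simp [PySem.Str.join, PySem.Chars.join_nil]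
  | cons a l ih =>
      simp only [List.foldl_cons, List.map_cons, ih, str_join_empty_cons, String.append_assoc]

-- B's streaming fold, with any window of ≤ 2 pending tokens, appends pvNgrams of window ++ remaining tokens.
lemma b_fold_invariant (l : List (List (String × String))) :
    ∀ (w : List String) (out : String), w.length ≤ 2 →
    (l.foldl (fun (st : String × List String) d =>
      let window := st.2 ++ [pvTok d]
      if window.length == 3 then
        (st.1 ++ (PySem.Str.join "" window ++ " "), PySem.List.slice window (some 1) none)
      else (st.1, window)) (out, w)).1 = out ++ pvNgrams (w ++ l.map pvTok) := by
  induction l with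
  | nil =>
      intro w out hw
      match w, hw with
      | [], _ => simp [pvNgrams]
      | [a], _ => simp [pvNgrams]
      | [a, b], _ => simp [pvNgrams]
  | cons d l ih =>
      intro w out hw
      simp only [List.foldl_cons, List.map_cons]
      match w, hw with
      | [], _ =>
          rw [if_neg (by simp)]
          simpa using ih [pvTok d] out (by simp)
      | [a], _ =>
          rw [if_neg (by simp)]
          simpa using ih [a, pvTok d] out (by simp)
      | [a, b], _ =>
          rw [if_pos (by simp)]
          have hs : PySem.List.slice ([a, b] ++ [pvTok d]) (some 1) none = [b, pvTok d] := by
            simp [PySem.List.slice]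
          rw [hs, ih [b, pvTok d] _ (by simp)]
          simp [pvNgrams, String.append_assoc]

-- The indexed-window join equals the reference recursion, for any token list of length ≥ 3.
lemma join_windows_eq_ngrams (ts : List String) (h : 3 ≤ ts.length) :
    PySem.Str.join "" ((List.range (ts.length - 2)).map
      (fun k => PySem.Str.join "" ((ts.drop k).take 3) ++ " ")) = pvNgrams ts := by
  induction ts with
  | nil => simp at h
  | cons a ts ih =>
      match ts, h with
      | b :: c :: rest, _ =>
        by_cases hr : rest = []
        · subst hr
          simp [pvNgrams, PySem.Str.join, PySem.Chars.join_singleton,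
            List.range_succ]
        · have h3 : 3 ≤ (b :: c :: rest).length := by
            cases rest with
            | nil => exact absurd rfl hr
            | cons x xs => simp
          have hlen : (a :: b :: c :: rest).length - 2 = ((b :: c :: rest).length - 2) + 1 := by
            simp
          rw [hlen, List.range_succ_eq_map, List.map_cons, str_join_empty_cons, List.map_map]
          have hmap : ((List.range ((b :: c :: rest).length - 2)).map
              ((fun k => PySem.Str.join "" (((a :: b :: c :: rest).drop k).take 3) ++ " ") ∘ (· + 1)))
              = (List.range ((b :: c :: rest).length - 2)).map
                (fun k => PySem.Str.join "" (((b :: c :: rest).drop k).take 3) ++ " ") := by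
            apply List.map_congr_left; intro k _; simp
          rw [hmap, ih h3]
          simp [pvNgrams]

-- The three indices of one A-window map to the 3-slice of the input.
lemma window3_map (xs : List (List (String × String))) (i : Int)
    (h0 : 0 ≤ i) (h3 : i.toNat + 3 ≤ xs.length) :
    (PySem.List.pyRange i (i + 3) 1).map (fun j => PySem.List.pyGetD xs j []) =
      (xs.drop i.toNat).take 3 := by
  obtain ⟨k, rfl⟩ : ∃ k : Nat, i = (k : Int) := ⟨i.toNat, (Int.toNat_of_nonneg h0).symm⟩
  rw [PySem.List.pyRange_one_cons (by omega), PySem.List.pyRange_one_cons (by omega),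
      PySem.List.pyRange_one_cons (by omega), PySem.List.pyRange_one_eq_nil (by omega)]
  rw [List.drop_eq_getElem_cons (by omega), List.drop_eq_getElem_cons (by omega),
      List.drop_eq_getElem_cons (by omega)]
  simp only [List.map_cons, List.map_nil, List.take_succ_cons, List.take_zero]
  have e1 : (k : Int) + 1 = ((k + 1 : Nat) : Int) := by push_cast; ring
  have e2 : ((k + 1 : Nat) : Int) + 1 = ((k + 2 : Nat) : Int) := by push_cast; ring
  rw [e1, e2]
  simp only [PySem.List.pyGetD_natCast]
  rw [List.getD_eq_getElem _ _ (by simp at h3 ⊢; omega),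
      List.getD_eq_getElem _ _ (by simp at h3 ⊢; omega),
      List.getD_eq_getElem _ _ (by simp at h3 ⊢; omega)]
  simp

-- A produces pvNgrams of the token list (when there are at least 3 rows).
lemma a_eq_ngrams (dict : List (List (String × String))) (h : 3 ≤ dict.length) :
    rhythms_to_ngrams dict = pvNgrams (dict.map pvTok) := by
  unfold rhythms_to_ngrams
  simp only [PySem.List.len_eq]
  rw [foldl_append_eq_join
    (g := fun i => ((PySem.List.pyRange i (i + 3) 1).foldl (fun ngram j =>
      ngram ++ ("(" ++ PySem.Dict.getD (PySem.Dict.mk (PySem.List.pyGetD dict j [])) "value" "" ++ ")")) "") ++ " ")]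
  rw [String.empty_append, ← join_windows_eq_ngrams (dict.map pvTok) (by simpa using h)]
  have hn : ((dict.length : Int) - 3 + 1) = (((dict.map pvTok).length - 2 : Nat) : Int) := by
    simp; omega
  rw [hn, PySem.List.pyRange_zero_natCast, List.map_map]
  congr 1
  apply List.map_congr_left
  intro k hk
  simp only [List.mem_range, List.length_map] at hk
  have h3 : (k : Int).toNat + 3 ≤ dict.length := by omega
  simp only [Function.comp]
  rw [foldl_append_eq_join
    (g := fun j => "(" ++ PySem.Dict.getD (PySem.Dict.mk (PySem.List.pyGetD dict j [])) "value" "" ++ ")")]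
  rw [String.empty_append]
  congr 1
  have hw := window3_map dict (k : Int) (by omega) h3
  rw [Int.toNat_natCast] at hw
  have h2 : (PySem.List.pyRange (k : Int) ((k : Int) + 3) 1).map
      (fun j => "(" ++ PySem.Dict.getD (PySem.Dict.mk (PySem.List.pyGetD dict j [])) "value" "" ++ ")")
      = ((dict.drop k).take 3).map pvTok := by
    rw [← hw, List.map_map]; rfl
  rw [h2, List.map_take, List.map_drop]

-- ===== VERDICT (by name: the statement is the Claim_ definition above) =====
theorem rhythms_to_ngrams_spec : Claim_equal_rhythms_to_ngrams := by
  intro dict _ _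
  unfold Spec_rhythms_to_ngrams rhythms_to_ngrams_alt
  simp only [PySem.List.len_eq]
  by_cases h : (dict.length : Int) < 3
  · rw [if_pos h]
    unfold rhythms_to_ngrams
    simp only [PySem.List.len_eq]
    rw [PySem.List.pyRange_one_eq_nil (by omega), List.foldl_nil]
  · rw [if_neg h]
    have := b_fold_invariant dict [] "" (by simp)
    simp only [List.nil_append, String.empty_append] at this
    show rhythms_to_ngrams dict = _
    rw [a_eq_ngrams dict (by omega)]
    exact this.symm
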